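-- pv_equiv track=rewrite | github.com/AdamZhouSE/pythonHomework | Code/CodeRecords/2121/60619/248307.py | get
-- ===== SOURCE A (Python) =====
-- def get(n):
--     if n > 10:
--         return get(10)
--     else:
--         result = 1
--         i = 0
--         while i < n:
--             result *= 10-i
--             i += 1
--         return result+1
-- ===== SOURCE B (Python) =====
-- # Closed-form: clamp n to [0,10], then 10!/(10-m)! + 1 via a precomputed factorial table.
-- FACT = [1, 1, 2, 6, 24, 120, 720, 5040, 40320, 362880, 3628800]
--
-- def get(n):
--     m = max(0, min(n, 10))
--     return FACT[10] // FACT[10 - m] + 1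
-- ===== Notes on version B (the rewrite author's own statement) =====
-- stated objective: simpler
-- what changed: Replaces A's recursion-plus-multiplying-loop with a closed form: clamp n into the table's range and return the quotient of precomputed factorials plus one.
import Mathlib
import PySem

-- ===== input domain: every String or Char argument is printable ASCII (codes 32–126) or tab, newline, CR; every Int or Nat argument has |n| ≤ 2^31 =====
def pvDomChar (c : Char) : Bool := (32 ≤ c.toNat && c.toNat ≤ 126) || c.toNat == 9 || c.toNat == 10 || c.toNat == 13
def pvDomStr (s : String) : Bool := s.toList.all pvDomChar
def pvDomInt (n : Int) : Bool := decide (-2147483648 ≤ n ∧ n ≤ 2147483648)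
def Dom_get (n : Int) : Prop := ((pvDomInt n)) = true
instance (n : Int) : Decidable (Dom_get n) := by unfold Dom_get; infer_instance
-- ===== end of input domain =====

-- B replaces A's recursion and multiplying loop with a clamped closed-form factorial-table lookup (simpler).


-- ===== PORT A =====
-- the 'while i < n: result *= 10-i; i += 1' loop of A
def getLoop (n result i : Int) : Int :=
  if i < n then getLoop n (result * (10 - i)) (i + 1) else result
termination_by (n - i).toNat
decreasing_by omega

def get (n : Int) : Int :=
  if n > 10 then get 10 else getLoop n 1 0 + 1
termination_by (n - 10).toNat
decreasing_by omega

-- ===== PORT B =====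
def pvFACT : List Int := [1, 1, 2, 6, 24, 120, 720, 5040, 40320, 362880, 3628800]

def get_alt (n : Int) : Int :=
  let m := max 0 (min n 10)
  -- FACT[10] and FACT[10-m]: indices are always in range (0 ≤ 10-m ≤ 10), so .getD 0 is exact
  PySem.Int.floordiv ((PySem.List.pyGet? pvFACT 10).getD 0)
    ((PySem.List.pyGet? pvFACT (10 - m)).getD 0) + 1

-- ===== PRECONDITION & SPEC =====
def Spec_get (n : Int) (out : Int) : Prop := out = get_alt n
instance (n : Int) (out : Int) : Decidable (Spec_get n out) := by unfold Spec_get; infer_instance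

-- ===== CLAIM (what is proved, stated in full; the proofs are below) =====
def Claim_equal_get : Prop := ∀ (n : Int), Dom_get n → Spec_get n (get n)

-- ===== LEMMAS AND PROOFS =====
-- structural-fuel mirror of getLoop, used only by the proofs (kernel-computable)
def loopN : Nat → Int → Int → Int
  | 0, result, _ => result
  | k + 1, result, i => loopN k (result * (10 - i)) (i + 1)

theorem getLoop_eq_loopN (k : Nat) : ∀ (n result i : Int), (n - i).toNat = k →
    getLoop n result i = loopN k result i := by
  induction k with
  | zero =>
    intro n result i hk
    rw [getLoop]
    have : ¬ i < n := by omega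
    simp [this, loopN]
  | succ k ih =>
    intro n result i hk
    rw [getLoop]
    have hlt : i < n := by omega
    simp only [hlt, if_pos]
    rw [ih n (result * (10 - i)) (i + 1) (by omega)]
    rfl

theorem getLoop_nonpos (n result i : Int) (h : ¬ i < n) : getLoop n result i = result := by
  rw [getLoop]; simp [h]

theorem get_alt_clamped (n : Int) (m : Int) (hm : max 0 (min n 10) = m) :
    get_alt n = PySem.Int.floordiv ((PySem.List.pyGet? pvFACT 10).getD 0)
      ((PySem.List.pyGet? pvFACT (10 - m)).getD 0) + 1 := by
  simp only [get_alt, hm]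

-- ===== VERDICT (by name: the statement is the Claim_ definition above) =====
theorem get_spec : Claim_equal_get := by
  unfold Claim_equal_get
  intro n _
  unfold Spec_get
  by_cases hbig : n > 10
  · rw [_root_.get, if_pos hbig, get_alt_clamped n 10 (by omega)]
    rw [_root_.get, if_neg (by omega), getLoop_eq_loopN 10 10 1 0 (by decide)]
    decide
  · rw [_root_.get, if_neg hbig]
    by_cases hpos : 0 < n
    · have h1 : 1 ≤ n := hpos
      have h2 : n ≤ 10 := by omega
      interval_cases n <;>
        · rw [getLoop_eq_loopN _ _ 1 0 rfl]; decide
    · rw [getLoop_nonpos n 1 0 hpos, get_alt_clamped n 0 (by omega)]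
      decide
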